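-- pv_equiv track=rewrite | github.com/rahulsingh3292/hackerrank | jumping_on_cloud.py | cloudJump
-- ===== SOURCE A (Python) =====
-- def cloudJump(c,k):
--   i = 0
--   n = len(c)
--   energy = 100
--   while True:
--     energy = (energy-1)-2*c[i]
--     i = (i+k)%n
--     if i == 0:
--       break
--   return energy
-- ===== SOURCE B (Python) =====
-- def cloudJump(c, k):
--     n = len(c)
--     g, r = n, k % n
--     while r:
--         g, r = r, g % r
--     steps = n // g
--     return 100 - steps - 2 * sum(c[(j * k) % n] for j in range(steps))
-- ===== Notes on version B (the rewrite author's own statement) =====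
-- stated objective: alternative
-- what changed: Replaces the energy-simulation while-loop with a closed-form step count n // gcd(n, k%n) plus one summation over the visited indices (j*k) % n.
import Mathlib
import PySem

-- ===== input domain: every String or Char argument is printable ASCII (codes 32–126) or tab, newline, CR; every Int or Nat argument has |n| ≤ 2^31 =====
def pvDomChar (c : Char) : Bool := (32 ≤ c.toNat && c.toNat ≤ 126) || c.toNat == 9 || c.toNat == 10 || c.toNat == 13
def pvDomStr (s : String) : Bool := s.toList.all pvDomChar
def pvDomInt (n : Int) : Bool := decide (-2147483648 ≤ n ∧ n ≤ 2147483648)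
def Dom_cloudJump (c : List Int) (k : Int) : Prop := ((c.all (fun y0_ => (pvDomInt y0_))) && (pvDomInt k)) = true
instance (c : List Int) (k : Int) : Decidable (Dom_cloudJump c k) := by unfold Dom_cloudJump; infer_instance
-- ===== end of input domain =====

-- B replaces A's energy-simulation loop with a closed-form step count n // gcd(n, k%n)
-- plus a single summation over the visited indices; same cost, different algorithm.

-- ===== PORT A =====
-- A's `while True` loop; the fuel `c.length` is only a totality guard (the loop breaks
-- after n // gcd(n,k) ≤ n iterations); pyGetD is a total guard for c[i] (i is always in range).
def cloudLoop (c : List Int) (k n : Int) : Nat → Int → Int → Int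
  | 0, _, energy => energy
  | fuel+1, i, energy =>
    let energy' := (energy - 1) - 2 * PySem.List.pyGetD c i 0
    let i' := PySem.Int.mod (i + k) n
    if i' = 0 then energy' else cloudLoop c k n fuel i' energy'

def cloudJump (c : List Int) (k : Int) : Int :=
  cloudLoop c k (c.length : Int) c.length 0 100

-- ===== PORT B =====
-- Euclid's loop from Source B: while r: g, r = r, g % r
def gcdLoop : Nat → Nat → Nat
  | g, 0 => g
  | g, r+1 => gcdLoop (r+1) (g % (r+1))
termination_by g r => r
decreasing_by exact Nat.mod_lt _ (Nat.succ_pos _)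

def cloudJump_alt (c : List Int) (k : Int) : Int :=
  let n := c.length
  let g := gcdLoop n (PySem.Int.mod k (n : Int)).toNat
  let steps := n / g
  100 - (steps : Int) -
    2 * ((List.range steps).map
          (fun (j : Nat) => PySem.List.pyGetD c (PySem.Int.mod ((j : Int) * k) (n : Int)) 0)).sum

-- ===== PRECONDITION & SPEC =====
-- Pre_ excludes only the empty list, on which both A and B raise
-- (A: IndexError on c[0]; B: ZeroDivisionError on k % 0).
def Pre_cloudJump (c : List Int) (k : Int) : Prop := c ≠ []
instance (c : List Int) (k : Int) : Decidable (Pre_cloudJump c k) := by unfold Pre_cloudJump; infer_instance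
def pvWitness_cloudJump : List Int × Int := ([3, 1, 2], 2)

def Spec_cloudJump (c : List Int) (k : Int) (out : Int) : Prop := out = cloudJump_alt c k
instance (c : List Int) (k : Int) (out : Int) : Decidable (Spec_cloudJump c k out) := by unfold Spec_cloudJump; infer_instance

-- ===== CLAIM (what is proved, stated in full; the proofs are below) =====
def Claim_equal_cloudJump : Prop := ∀ (c : List Int) (k : Int), Dom_cloudJump c k → Pre_cloudJump c k → Spec_cloudJump c k (cloudJump c k)

-- ===== LEMMAS AND PROOFS =====

-- index visited at step j, as a natural number
def pvIdx (m n j : Nat) : Nat := (j * m) % n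
-- partial sum of visited cloud values
def pvS (c : List Int) (m n j : Nat) : Int :=
  ((List.range j).map (fun t => c.getD (pvIdx m n t) 0)).sum
-- energy after j iterations of A's loop
def pvE (c : List Int) (m n j : Nat) : Int := 100 - (j : Int) - 2 * pvS c m n j

lemma pvS_succ (c : List Int) (m n j : Nat) :
    pvS c m n (j+1) = pvS c m n j + c.getD (pvIdx m n j) 0 := by
  simp [pvS, List.range_succ]

lemma gcdLoop_eq (r : Nat) : ∀ g, gcdLoop g r = Nat.gcd r g := by
  induction r using Nat.strong_induction_on with
  | _ r ih =>
    intro g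
    cases r with
    | zero => rw [gcdLoop]; exact (Nat.gcd_zero_left g).symm
    | succ r' =>
      rw [gcdLoop, ih (g % (r'+1)) (Nat.mod_lt _ (Nat.succ_pos _))]
      exact (Nat.gcd_rec (r'+1) g).symm

lemma idx_int (k : Int) (m n : Nat) (hm : (m : Int) = k % (n : Int)) (j : Nat) :
    ((j : Int) * k) % (n : Int) = ((pvIdx m n j : Nat) : Int) := by
  have h1 : ((j : Int) * (k % n)) % (n : Int) = ((j : Int) * k) % (n : Int) := by
    conv_rhs => rw [Int.mul_emod]
    rw [Int.mul_emod, Int.emod_emod_of_dvd _ dvd_rfl]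
  rw [pvIdx]
  push_cast
  rw [← h1, ← hm]

lemma idx_step (k : Int) (m n : Nat) (hn : 0 < n)
    (hm : (m : Int) = k % (n : Int)) (j : Nat) :
    PySem.Int.mod ((pvIdx m n j : Nat) + k) (n : Int) = ((pvIdx m n (j+1) : Nat) : Int) := by
  rw [PySem.Int.mod_eq_emod_of_pos (by exact_mod_cast hn)]
  rw [← idx_int k m n hm j, Int.emod_add_emod, ← idx_int k m n hm (j+1)]
  congr 1
  push_cast
  ring

lemma idx_zero_iff (m n : Nat) (hn : 0 < n) (j : Nat) :
    pvIdx m n j = 0 ↔ (n / Nat.gcd n m) ∣ j := by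
  have hg : 0 < Nat.gcd n m := Nat.gcd_pos_of_pos_left _ hn
  have hmod : pvIdx m n j = 0 ↔ n ∣ j * m :=
    ⟨Nat.dvd_of_mod_eq_zero, Nat.mod_eq_zero_of_dvd⟩
  rw [hmod]
  constructor
  · intro hdvd
    have hco : Nat.Coprime (n / Nat.gcd n m) (m / Nat.gcd n m) :=
      Nat.coprime_div_gcd_div_gcd hg
    have h1 : n / Nat.gcd n m ∣ j * (m / Nat.gcd n m) := by
      obtain ⟨t, ht⟩ := hdvd
      refine ⟨t, ?_⟩
      apply Nat.eq_of_mul_eq_mul_left hg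
      calc Nat.gcd n m * (j * (m / Nat.gcd n m))
          = j * (Nat.gcd n m * (m / Nat.gcd n m)) := by ring
        _ = j * m := by rw [Nat.mul_div_cancel' (Nat.gcd_dvd_right n m)]
        _ = n * t := ht
        _ = Nat.gcd n m * (n / Nat.gcd n m * t) := by
              rw [← Nat.mul_assoc, Nat.mul_div_cancel' (Nat.gcd_dvd_left n m)]
    exact hco.dvd_of_dvd_mul_right h1
  · intro ⟨u, hu⟩
    refine ⟨(m / Nat.gcd n m) * u, ?_⟩
    calc j * m = n / Nat.gcd n m * u * m := by rw [hu]
      _ = (n / Nat.gcd n m * m) * u := by ring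
      _ = (n * (m / Nat.gcd n m)) * u := by
            have h2 : n / Nat.gcd n m * m = n * (m / Nat.gcd n m) := by
              calc n / Nat.gcd n m * m
                  = n / Nat.gcd n m * (m / Nat.gcd n m * Nat.gcd n m) := by
                    rw [Nat.div_mul_cancel (Nat.gcd_dvd_right n m)]
                _ = (n / Nat.gcd n m * Nat.gcd n m) * (m / Nat.gcd n m) := by ring
                _ = n * (m / Nat.gcd n m) := by rw [Nat.div_mul_cancel (Nat.gcd_dvd_left n m)]
            rw [h2]
      _ = n * (m / Nat.gcd n m * u) := by ring

lemma cloudLoop_run (c : List Int) (k : Int) (m : Nat) (hn : 0 < c.length)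
    (hm : (m : Int) = k % (c.length : Int)) :
    ∀ (d j fuel : Nat), j + d + 1 = c.length / Nat.gcd c.length m → d + 1 ≤ fuel →
      cloudLoop c k (c.length : Int) fuel ((pvIdx m c.length j : Nat) : Int) (pvE c m c.length j)
        = pvE c m c.length (c.length / Nat.gcd c.length m) := by
  intro d
  induction d with
  | zero =>
    intro j fuel hj hf
    obtain ⟨f', rfl⟩ : ∃ f', fuel = f' + 1 := ⟨fuel - 1, by omega⟩
    rw [cloudLoop]
    have hidx : PySem.Int.mod ((pvIdx m c.length j : Nat) + k) (c.length : Int)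
        = ((pvIdx m c.length (j+1) : Nat) : Int) := idx_step k m c.length hn hm j
    have hz : pvIdx m c.length (j+1) = 0 := by
      rw [idx_zero_iff m c.length hn]
      exact ⟨1, by omega⟩
    have henergy : (pvE c m c.length j - 1) - 2 * PySem.List.pyGetD c ((pvIdx m c.length j : Nat) : Int) 0
        = pvE c m c.length (j+1) := by
      rw [PySem.List.pyGetD_natCast, pvE, pvE, pvS_succ]
      push_cast
      ring
    simp only [hidx, hz, henergy]
    simp only [Nat.cast_zero, if_true]
    rw [show j + 1 = c.length / Nat.gcd c.length m from by omega]
  | succ d ih =>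
    intro j fuel hj hf
    obtain ⟨f', rfl⟩ : ∃ f', fuel = f' + 1 := ⟨fuel - 1, by omega⟩
    rw [cloudLoop]
    have hidx : PySem.Int.mod ((pvIdx m c.length j : Nat) + k) (c.length : Int)
        = ((pvIdx m c.length (j+1) : Nat) : Int) := idx_step k m c.length hn hm j
    have hnz : pvIdx m c.length (j+1) ≠ 0 := by
      intro h0
      rw [idx_zero_iff m c.length hn] at h0
      have := Nat.le_of_dvd (by omega) h0
      omega
    have henergy : (pvE c m c.length j - 1) - 2 * PySem.List.pyGetD c ((pvIdx m c.length j : Nat) : Int) 0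
        = pvE c m c.length (j+1) := by
      rw [PySem.List.pyGetD_natCast, pvE, pvE, pvS_succ]
      push_cast
      ring
    simp only [hidx, henergy]
    rw [if_neg (by exact_mod_cast hnz)]
    exact ih (j+1) f' (by omega) (by omega)

theorem cloudJump_eq_closed (c : List Int) (k : Int) (h : c ≠ []) :
    cloudJump c k = cloudJump_alt c k := by
  have hn : 0 < c.length := List.length_pos_iff.mpr h
  have hn' : (0 : Int) < (c.length : Int) := by exact_mod_cast hn
  have hm : (((PySem.Int.mod k (c.length : Int)).toNat : Nat) : Int) = k % (c.length : Int) := by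
    rw [PySem.Int.mod_eq_emod_of_pos hn', Int.toNat_of_nonneg (Int.emod_nonneg _ (by omega))]
  have hg : 0 < Nat.gcd c.length (PySem.Int.mod k (c.length : Int)).toNat :=
    Nat.gcd_pos_of_pos_left _ hn
  have hs1 : 1 ≤ c.length / Nat.gcd c.length (PySem.Int.mod k (c.length : Int)).toNat :=
    (Nat.one_le_div_iff hg).mpr (Nat.le_of_dvd hn (Nat.gcd_dvd_left _ _))
  have hsn : c.length / Nat.gcd c.length (PySem.Int.mod k (c.length : Int)).toNat ≤ c.length :=
    Nat.div_le_self _ _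
  have hA : cloudJump c k
      = pvE c (PySem.Int.mod k (c.length : Int)).toNat c.length
          (c.length / Nat.gcd c.length (PySem.Int.mod k (c.length : Int)).toNat) := by
    have h0 : ((0 : Int)) = ((pvIdx (PySem.Int.mod k (c.length : Int)).toNat c.length 0 : Nat) : Int) := by
      simp [pvIdx]
    have h100 : (100 : Int) = pvE c (PySem.Int.mod k (c.length : Int)).toNat c.length 0 := by
      simp [pvE, pvS]
    rw [cloudJump, h0, h100]
    exact cloudLoop_run c k _ hn hm
      (c.length / Nat.gcd c.length (PySem.Int.mod k (c.length : Int)).toNat - 1) 0 c.length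
      (by omega) (by omega)
  have hB : cloudJump_alt c k
      = pvE c (PySem.Int.mod k (c.length : Int)).toNat c.length
          (c.length / Nat.gcd c.length (PySem.Int.mod k (c.length : Int)).toNat) := by
    rw [cloudJump_alt]
    simp only [gcdLoop_eq, Nat.gcd_comm (PySem.Int.mod k (c.length : Int)).toNat c.length]
    have hmap : ∀ j : Nat,
        PySem.List.pyGetD c (PySem.Int.mod ((j : Int) * k) (c.length : Int)) 0
          = c.getD (pvIdx (PySem.Int.mod k (c.length : Int)).toNat c.length j) 0 := by
      intro j
      rw [PySem.Int.mod_eq_emod_of_pos hn',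
        idx_int k _ c.length hm j, PySem.List.pyGetD_natCast]
    simp only [hmap]
    rw [pvE, pvS]
  rw [hA, hB]

-- ===== VERDICT (by name: the statement is the Claim_ definition above) =====
theorem cloudJump_spec : Claim_equal_cloudJump := by
  intro c k _ hpre
  exact cloudJump_eq_closed c k hpre
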